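-- pv_equiv track=rewrite | github.com/MrBrantCode/unitest_baseline | mut_generate/mist_train_taco/taco_3795/solution.py | calculate_max_sandwiches
-- ===== SOURCE A (Python) =====
-- def calculate_max_sandwiches(N, A):
--     oc = 0
--     mi = float('inf')
--
--     for a in A:
--         if a % 2:
--             oc += 1
--             mi = min(mi, a)
--
--     total_bread = sum(A)
--     if oc % 2:
--         total_bread -= mi
--
--     return total_bread // 2
-- ===== SOURCE B (Python) =====
-- def calculate_max_sandwiches(N, A):
--     total = sum(A)
--     if total % 2 == 0:
--         return total // 2
--     for a in sorted(A):
--         if a % 2: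
--             return (total - a) // 2
-- ===== Notes on version B (the rewrite author's own statement) =====
-- stated objective: alternative
-- what changed: Replaced the odd-count/running-min accumulator loop by the number-theoretic observation that the odd count is odd exactly when sum(A) is odd: B tests the parity of the total directly and, only when it is odd, finds the minimum odd element as the first odd value of sorted(A), never counting odds or tracking a running minimum.
import Mathlib
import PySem

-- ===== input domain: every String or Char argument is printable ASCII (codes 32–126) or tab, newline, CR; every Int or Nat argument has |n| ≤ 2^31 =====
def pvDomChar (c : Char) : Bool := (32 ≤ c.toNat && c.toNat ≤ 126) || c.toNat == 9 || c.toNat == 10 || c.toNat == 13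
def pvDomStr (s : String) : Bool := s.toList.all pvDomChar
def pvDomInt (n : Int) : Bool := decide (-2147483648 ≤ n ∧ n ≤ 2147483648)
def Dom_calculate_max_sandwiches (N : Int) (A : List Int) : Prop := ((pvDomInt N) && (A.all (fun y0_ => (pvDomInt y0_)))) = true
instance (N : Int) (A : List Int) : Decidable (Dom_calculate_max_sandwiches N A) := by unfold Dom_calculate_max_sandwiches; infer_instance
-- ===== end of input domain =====

-- B drops A's fused odd-count/min-odd accumulator: sum(A) is odd iff the odd count is odd, so B tests the total's parity and, when odd, scans sorted(A) for its first odd element (the minimum odd value); alternative algorithm, same asymptotics up to the sort.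


-- ===== PORT A =====
-- literal port of A: one fused loop carrying (odd count, running minimum odd);
-- mi = float('inf') is ported as Option Int (none = inf), exact because mi is only
-- subtracted when oc % 2 ≠ 0, which forces mi to hold an actual list element.
def calculate_max_sandwiches (N : Int) (A : List Int) : Int :=
  let st := A.foldl
    (fun (s : Int × Option Int) a =>
      if PySem.Int.mod a 2 ≠ 0 then
        (s.1 + 1, some (match s.2 with | none => a | some m => min m a))
      else s)
    (0, none)
  let total_bread := A.foldl (· + ·) 0
  let total_bread := if PySem.Int.mod st.1 2 ≠ 0 then total_bread - st.2.getD 0 else total_bread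
  PySem.Int.floordiv total_bread 2

-- ===== PORT B =====
-- B's loop "for a in sorted(A): if a % 2: return (total - a) // 2"; the [] case is
-- Python's fall-through (unreachable: an odd total forces an odd element to exist).
def pvFirstOddResult (total : Int) : List Int → Int
  | [] => 0
  | a :: t => if PySem.Int.mod a 2 ≠ 0 then PySem.Int.floordiv (total - a) 2
              else pvFirstOddResult total t

def calculate_max_sandwiches_alt (N : Int) (A : List Int) : Int :=
  let total := A.foldl (· + ·) 0
  if PySem.Int.mod total 2 = 0 then PySem.Int.floordiv total 2
  else pvFirstOddResult total (PySem.List.sorted A (fun x => x) false)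

-- ===== PRECONDITION & SPEC =====
def Spec_calculate_max_sandwiches (N : Int) (A : List Int) (out : Int) : Prop := out = calculate_max_sandwiches_alt N A
instance (N : Int) (A : List Int) (out : Int) : Decidable (Spec_calculate_max_sandwiches N A out) := by unfold Spec_calculate_max_sandwiches; infer_instance

-- ===== CLAIM (what is proved, stated in full; the proofs are below) =====
def Claim_equal_calculate_max_sandwiches : Prop := ∀ (N : Int) (A : List Int), Dom_calculate_max_sandwiches N A → Spec_calculate_max_sandwiches N A (calculate_max_sandwiches N A)

-- ===== LEMMAS AND PROOFS =====

lemma pv_mod2 (a : Int) : PySem.Int.mod a 2 = a % 2 := by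
  simp [PySem.Int.mod]
  rw [Int.fmod_eq_emod]
  omega

def pvOdd (a : Int) : Bool := a % 2 ≠ 0

def pvLoopA : (Int × Option Int) → List Int → (Int × Option Int) :=
  fun s l => l.foldl
    (fun (s : Int × Option Int) a =>
      if PySem.Int.mod a 2 ≠ 0 then
        (s.1 + 1, some (match s.2 with | none => a | some m => min m a))
      else s) s

-- A's loop state = (count of odds so far, running min over the odds)
lemma pvLoopA_eq (l : List Int) : ∀ (oc : Int) (mi : Option Int),
    pvLoopA (oc, mi) l =
      (oc + (l.filter pvOdd).length,
       (l.filter pvOdd).foldl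
         (fun m a => some (match m with | none => a | some x => min x a)) mi) := by
  induction l with
  | nil => intro oc mi; simp [pvLoopA]
  | cons a t ih =>
    intro oc mi
    by_cases h : a % 2 = 0
    · simpa [pvLoopA, List.foldl, pvOdd, pv_mod2, h] using ih oc mi
    · simpa [pvLoopA, List.foldl, pvOdd, pv_mod2, h, add_assoc, add_comm, add_left_comm] using
        ih (oc + 1) (some (match mi with | none => a | some m => min m a))

lemma pvMinAcc_some (l : List Int) : ∀ (m : Int),
    l.foldl (fun m a => some (match m with | none => a | some x => min x a)) (some m)
      = some (l.foldl min m) := by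
  induction l with
  | nil => intro m; simp
  | cons a t ih => intro m; simpa using ih (min m a)

-- parity: the sum of a list is odd exactly when its odd-element count is odd
lemma pv_sum_parity (l : List Int) : ∀ s : Int,
    (l.foldl (· + ·) s) % 2 = (s + ((l.filter pvOdd).length : Int)) % 2 := by
  induction l with
  | nil => intro s; simp
  | cons a t ih =>
    intro s
    have ht := ih (s + a)
    by_cases h : a % 2 = 0
    · simp only [List.foldl_cons, List.filter_cons, pvOdd]
      rw [if_neg (by simpa using h)]
      omega
    · simp only [List.foldl_cons, List.filter_cons, pvOdd]
      rw [if_pos (by simpa using h)]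
      simp only [List.length_cons]
      push_cast
      omega

-- B's scan returns the result built from the FIRST odd element of its list
lemma pvFirstOddResult_eq (total : Int) (l : List Int) :
    pvFirstOddResult total l =
      (match l.filter pvOdd with
       | [] => 0
       | a :: _ => PySem.Int.floordiv (total - a) 2) := by
  induction l with
  | nil => simp [pvFirstOddResult]
  | cons a t ih =>
    by_cases h : a % 2 = 0
    · simpa [pvFirstOddResult, pv_mod2, pvOdd, h] using ih
    · simp [pvFirstOddResult, pvOdd, h]

-- filtering a sorted list gives the sorted filtered list
lemma pv_filter_sorted (A : List Int) :
    (PySem.List.sorted A (fun x => x) false).filter pvOdd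
      = PySem.List.sorted (A.filter pvOdd) (fun x => x) false := by
  symm
  apply PySem.List.sorted_id_eq_of_perm_of_pairwise
  · exact ((PySem.List.sorted_perm A (fun x => x) false).filter pvOdd)
  · exact (PySem.List.sorted_pairwise A (fun x => x)).sublist List.filter_sublist

-- head of the sorted odds = running min of the odds
lemma pv_sorted_head_min (x : Int) (t : List Int) (m : Int) (r : List Int)
    (h : PySem.List.sorted (x :: t) (fun y => y) false = m :: r) :
    m = t.foldl min x := by
  have hmem : m ∈ x :: t := by
    have := PySem.List.mem_sorted (xs := x :: t) (key := fun y => y) (rev := false) (x := m)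
    rw [h] at this
    exact this.mp (by simp)
  have hle : ∀ y ∈ x :: t, m ≤ y := fun y hy => by simpa using PySem.List.key_head_sorted_le (x :: t) (fun z => z) h y hy
  have hmin : PySem.List.min? (x :: t) (fun y => y) = some (t.foldl min x) :=
    PySem.List.min?_id_cons x t
  have hmem' : t.foldl min x ∈ x :: t := PySem.List.min?_mem hmin
  have h1 : m ≤ t.foldl min x := hle _ hmem'
  have h2 : t.foldl min x ≤ m := PySem.List.min?_isMin hmin m hmem
  omega

-- ===== VERDICT (by name: the statement is the Claim_ definition above) =====
theorem calculate_max_sandwiches_spec : Claim_equal_calculate_max_sandwiches := by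
  intro N A _
  show _ = _
  unfold calculate_max_sandwiches calculate_max_sandwiches_alt
  have hl := pvLoopA_eq A 0 none
  simp only [pvLoopA] at hl
  have hpar := pv_sum_parity A 0
  simp only [zero_add] at hpar
  rw [hl]
  simp only [pvFirstOddResult_eq, pv_filter_sorted, pv_mod2, zero_add]
  cases hf : A.filter pvOdd with
  | nil =>
    rw [hf] at hpar
    simp only [(PySem.List.sorted_eq_nil_iff ([] : List Int) (fun x => x) false).mpr rfl]
    rw [if_neg (by simp), if_pos (by simpa using hpar)]
  | cons x t =>
    rw [hf] at hpar
    simp only [List.foldl_cons, pvMinAcc_some]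
    cases hs : PySem.List.sorted (x :: t) (fun y => y) false with
    | nil => exact absurd ((PySem.List.sorted_eq_nil_iff _ _ _).mp hs) (by simp)
    | cons m r =>
      have hm : m = t.foldl min x := pv_sorted_head_min x t m r hs
      subst hm
      simp only [Option.getD_some]
      by_cases hodd : ((x :: t).length : Int) % 2 = 0
      · rw [if_neg (by simpa using hodd), if_pos (by omega)]
      · rw [if_pos (by simpa using hodd), if_neg (by omega)]
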